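-- pv_equiv track=rewrite | github.com/eliza-01/Revive | tools/list.py | _split_patterns
-- ===== SOURCE A (Python) =====
-- from typing import Iterable, List, Tuple
--
-- def _split_patterns(extra: List[str]) -> List[str]:
--     out = []
--     for s in extra:
--         for token in s.split(";"):
--             t = token.strip()
--             if t:
--                 out.append(t)
--     return out
-- ===== SOURCE B (Python) =====
-- from typing import List
--
-- def _split_patterns(extra: List[str]) -> List[str]:
--     # One-pass character scanner: builds each token directly (leading whitespace
--     # skipped, trailing whitespace held back in `pending`), so no split()/strip()
--     # calls and no intermediate token list are needed.
--     out = []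
--     for s in extra:
--         token = []    # committed token chars (never starts or ends with whitespace)
--         pending = []  # whitespace seen since the last committed char
--         for ch in s:
--             if ch == ';':
--                 if token:
--                     out.append(''.join(token))
--                 token = []
--                 pending = []
--             elif ch.isspace():
--                 if token:
--                     pending.append(ch)
--             else:
--                 token += pending
--                 pending = []
--                 token.append(ch)
--         if token:
--             out.append(''.join(token))
--     return out
-- ===== Notes on version B (the rewrite author's own statement) =====
-- stated objective: alternative
-- what changed: B replaces A's split(';')/strip() pipeline with a single character-level scanner per string that assembles each token in place, skipping leading whitespace and buffering tentative trailing whitespace, emitting a token at each ';' or end of string.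
import Mathlib
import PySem

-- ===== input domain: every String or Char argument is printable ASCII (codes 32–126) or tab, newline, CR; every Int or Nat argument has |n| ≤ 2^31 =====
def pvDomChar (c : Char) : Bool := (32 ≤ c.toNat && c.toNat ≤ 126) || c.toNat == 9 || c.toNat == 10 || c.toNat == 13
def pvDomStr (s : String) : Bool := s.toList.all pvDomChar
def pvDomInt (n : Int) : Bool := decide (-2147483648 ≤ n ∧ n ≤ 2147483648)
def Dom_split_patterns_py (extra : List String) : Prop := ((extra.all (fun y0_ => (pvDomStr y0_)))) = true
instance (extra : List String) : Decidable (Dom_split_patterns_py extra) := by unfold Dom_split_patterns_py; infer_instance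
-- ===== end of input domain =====

-- B replaces A's split(';')/strip() pipeline with a one-pass character scanner per string that assembles each token in place (alternative decomposition, same cost); both ports are pure, no mutation is observable.


-- ===== PORT A =====
-- s.split(";") never raises (sep nonempty), so the Option from split? is peeled with getD [] (never taken).
def split_patterns_py (extra : List String) : List String :=
  extra.foldl (fun out s =>
    ((PySem.Str.split? s ";").getD []).foldl (fun out token =>
      let t := PySem.Str.strip token
      if t ≠ "" then out ++ [t] else out) out) []

-- ===== PORT B =====
-- the body of B's inner character loop: state (token, pending, out)
def spScanStep (st : List Char × List Char × List String) (ch : Char) :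
    List Char × List Char × List String :=
  let (token, pending, out) := st
  if ch = ';' then
    ([], [], if token ≠ [] then out ++ [String.ofList token] else out)
  else if PySem.Chars.isspace ch then
    (token, if token ≠ [] then pending ++ [ch] else pending, out)
  else
    (token ++ pending ++ [ch], [], out)

def split_patterns_py_alt (extra : List String) : List String :=
  extra.foldl (fun out s =>
    let st := s.toList.foldl spScanStep ([], [], out)
    if st.1 ≠ [] then st.2.2 ++ [String.ofList st.1] else st.2.2) []

-- ===== PRECONDITION & SPEC =====
def Spec_split_patterns_py (extra : List String) (out : List String) : Prop := out = split_patterns_py_alt extra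
instance (extra : List String) (out : List String) : Decidable (Spec_split_patterns_py extra out) := by unfold Spec_split_patterns_py; infer_instance

-- ===== CLAIM (what is proved, stated in full; the proofs are below) =====
def Claim_equal_split_patterns_py : Prop := ∀ (extra : List String), Dom_split_patterns_py extra → Spec_split_patterns_py extra (split_patterns_py extra)

-- ===== LEMMAS AND PROOFS =====

-- structural reformulation of splitting a char list on the single separator ';'
def spSemi : List Char → List (List Char)
  | [] => [[]]
  | c :: rest => if c = ';' then [] :: spSemi rest else (spSemi rest).modifyHead (c :: ·)

theorem spSemi_ne_nil (l : List Char) : spSemi l ≠ [] := by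
  induction l with
  | nil => simp [spSemi]
  | cons c rest ih =>
    simp only [spSemi]
    split
    · simp
    · cases h : spSemi rest with
      | nil => exact absurd h ih
      | cons a t => simp [List.modifyHead]

theorem splitOn_go_eq (fuel : Nat) : ∀ (l cur : List Char) (accs : List (List Char)),
    l.length < fuel →
    PySem.Chars.splitOn.go [';'] fuel l cur accs =
      accs.reverse ++ (spSemi l).modifyHead (cur.reverse ++ ·) := by
  induction fuel with
  | zero => intro l cur accs h; omega
  | succ fuel ih =>
    intro l cur accs hl
    cases l with
    | nil =>
      simp [PySem.Chars.splitOn.go, spSemi, List.modifyHead]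
    | cons c rest =>
      by_cases hc : c = ';'
      · subst hc
        have hpre : [';'].isPrefixOf (';' :: rest) = true := by simp [List.isPrefixOf]
        simp only [PySem.Chars.splitOn.go, hpre, if_true, List.length_cons] at *
        have hd : List.drop (List.length ([] : List Char) + 1) (';' :: rest) = rest := by simp
        rw [hd, ih rest [] (cur.reverse :: accs) (by omega)]
        simp only [spSemi, List.modifyHead, List.reverse_cons, List.reverse_nil, List.nil_append,
          List.append_assoc, List.cons_append]
        cases spSemi rest <;> simp
      · have hpre : [';'].isPrefixOf (c :: rest) = false := by
          simp [List.isPrefixOf]; exact fun h => (hc h.symm).elim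
        simp only [PySem.Chars.splitOn.go, hpre, Bool.false_eq_true, if_false]
        rw [ih rest (c :: cur) accs (by simp at hl ⊢; omega)]
        have : spSemi (c :: rest) = (spSemi rest).modifyHead (c :: ·) := by
          simp [spSemi, hc]
        rw [this]
        obtain ⟨h, t, ht⟩ : ∃ h t, spSemi rest = h :: t := by
          cases hsp : spSemi rest with
          | nil => exact absurd hsp (spSemi_ne_nil rest)
          | cons h t => exact ⟨h, t, rfl⟩
        simp [ht, List.modifyHead]

theorem splitOn_eq_spSemi (l : List Char) : PySem.Chars.splitOn l [';'] = spSemi l := by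
  unfold PySem.Chars.splitOn
  rw [splitOn_go_eq (l.length + 1) l [] [] (by omega)]
  obtain ⟨h, t, ht⟩ : ∃ h t, spSemi l = h :: t := by
    cases hsp : spSemi l with
    | nil => exact absurd hsp (spSemi_ne_nil l)
    | cons h t => exact ⟨h, t, rfl⟩
  simp [ht, List.modifyHead]

theorem spSemi_append (x y : List Char) :
    spSemi (x ++ ';' :: y) = spSemi x ++ spSemi y := by
  induction x with
  | nil => simp [spSemi]
  | cons c rest ih =>
    by_cases hc : c = ';'
    · subst hc; simp [spSemi, ih]
    · simp only [List.cons_append, spSemi, hc, if_false, ih]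
      obtain ⟨h, t, ht⟩ : ∃ h t, spSemi rest = h :: t := by
        cases hsp : spSemi rest with
        | nil => exact absurd hsp (spSemi_ne_nil rest)
        | cons h t => exact ⟨h, t, rfl⟩
      simp [ht, List.modifyHead]

-- s.split(";") at the String level, and its char-list image
def cSplit (s : String) : List String := (PySem.Str.split? s ";").getD []

theorem cSplit_toList (s : String) :
    (cSplit s).map String.toList = spSemi s.toList := by
  have h := PySem.Str.split?_map s ";"
  unfold cSplit
  cases hs : PySem.Str.split? s ";" with
  | none =>
    rw [hs] at h
    simp [PySem.Chars.split?] at h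
  | some L =>
    rw [hs] at h
    simp only [Option.map_some] at h
    simp [PySem.Chars.split?] at h
    simp [h, splitOn_eq_spSemi]

theorem inner_fold (tokens out : List String) :
    tokens.foldl (fun out token =>
      let t := PySem.Str.strip token
      if t ≠ "" then out ++ [t] else out) out =
    out ++ (tokens.map PySem.Str.strip).filter (fun t => t ≠ "") := by
  rw [List.filter_map]
  have hfun : (fun (out : List String) token =>
      let t := PySem.Str.strip token
      if t ≠ "" then out ++ [t] else out) =
      (fun out token => if ((fun tok => decide (PySem.Str.strip tok ≠ "")) token) = true
        then out ++ [PySem.Str.strip token] else out) := by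
    funext o t; simp
  rw [hfun, PySem.List.foldl_append_if]
  rfl

theorem splitA_eq_flatMap (extra : List String) :
    split_patterns_py extra =
      extra.flatMap (fun s => (cSplit s |>.map PySem.Str.strip).filter (fun t => t ≠ "")) := by
  unfold split_patterns_py
  have : (fun (out : List String) (s : String) =>
      ((PySem.Str.split? s ";").getD []).foldl (fun out token =>
        let t := PySem.Str.strip token
        if t ≠ "" then out ++ [t] else out) out) =
      (fun out s => out ++ ((cSplit s).map PySem.Str.strip).filter (fun t => t ≠ "")) := by
    funext o s
    exact inner_fold _ o
  rw [this, PySem.List.foldl_append_eq_flatMap]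
  simp

-- ===== B-side: the scanner computes strip-and-filter of the semicolon segments =====

def emitC (l : List Char) : List String :=
  ((spSemi l).map (fun seg => String.ofList (PySem.Chars.strip seg))).filter (fun t => t ≠ "")

theorem spSemi_no_semi (l : List Char) (h : ';' ∉ l) : spSemi l = [l] := by
  induction l with
  | nil => rfl
  | cons c rest ih =>
    have hc : c ≠ ';' := fun e => h (e ▸ List.mem_cons_self)
    simp only [spSemi, hc, if_false]
    rw [ih (fun m => h (List.mem_cons_of_mem _ m))]
    rfl

theorem strip_cons_space (c : Char) (l : List Char) (h : PySem.Chars.isspace c = true) :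
    PySem.Chars.strip (c :: l) = PySem.Chars.strip l := by
  simp [PySem.Chars.strip, PySem.Chars.lstrip, List.dropWhile, h]

theorem emitC_cons_space (c : Char) (l : List Char) (hc : c ≠ ';')
    (h : PySem.Chars.isspace c = true) : emitC (c :: l) = emitC l := by
  unfold emitC
  simp only [spSemi, hc, if_false]
  obtain ⟨hd, tl, ht⟩ : ∃ hd tl, spSemi l = hd :: tl := by
    cases hsp : spSemi l with
    | nil => exact absurd hsp (spSemi_ne_nil l)
    | cons a t => exact ⟨a, t, rfl⟩
  simp [ht, List.modifyHead, strip_cons_space c hd h]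

theorem strip_of_clean (tok pend : List Char)
    (hh : ∀ h, tok.head? = some h → PySem.Chars.isspace h = false)
    (hl : ∀ h, tok.getLast? = some h → PySem.Chars.isspace h = false)
    (hpw : ∀ x ∈ pend, PySem.Chars.isspace x = true) :
    PySem.Chars.strip (tok ++ pend) = tok := by
  cases tok with
  | nil =>
    have : PySem.Chars.lstrip pend = [] := by
      simp [PySem.Chars.lstrip, List.dropWhile_eq_nil_iff]
      exact hpw
    simp [PySem.Chars.strip, this, PySem.Chars.rstrip]
  | cons a t =>
    have ha : PySem.Chars.isspace a = false := hh a rfl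
    have hlstrip : PySem.Chars.lstrip ((a :: t) ++ pend) = (a :: t) ++ pend := by
      simp [PySem.Chars.lstrip, ha]
    have hrevpend : ∀ x ∈ pend.reverse, PySem.Chars.isspace x = true := by
      intro x hx; exact hpw x (List.mem_reverse.mp hx)
    have hdropP : List.dropWhile PySem.Chars.isspace (pend.reverse ++ (a :: t).reverse) =
        List.dropWhile PySem.Chars.isspace ((a :: t).reverse) := by
      rw [List.dropWhile_append]
      have : List.dropWhile PySem.Chars.isspace pend.reverse = [] := by
        simp [List.dropWhile_eq_nil_iff]
        exact fun x hx => hrevpend x (by simpa using hx)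
      simp [this]
    have hlast : ∃ b r, (a :: t).reverse = b :: r ∧ PySem.Chars.isspace b = false := by
      have hne : (a :: t) ≠ [] := by simp
      obtain ⟨b, hb⟩ := List.getLast?_isSome.mpr hne |> Option.isSome_iff_exists.mp
      refine ⟨b, (a :: t).reverse.tail, ?_, hl b hb⟩
      have : (a :: t).reverse.head? = some b := by
        rw [List.head?_reverse]; exact hb
      cases hr : (a :: t).reverse with
      | nil => simp [hr] at this
      | cons x r => rw [hr] at this; simp at this; simp [this]
    obtain ⟨b, r, hbr, hbf⟩ := hlast
    have hdropT : List.dropWhile PySem.Chars.isspace ((a :: t).reverse) = (a :: t).reverse := by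
      rw [hbr]; simp [List.dropWhile, hbf]
    simp only [PySem.Chars.strip, hlstrip, PySem.Chars.rstrip, List.reverse_append, hdropP, hdropT]
    simp

theorem emitC_flush (tok pend : List Char)
    (hpe : tok = [] → pend = [])
    (hpw : ∀ x ∈ pend, PySem.Chars.isspace x = true)
    (hns : ';' ∉ tok)
    (hh : ∀ h, tok.head? = some h → PySem.Chars.isspace h = false)
    (hl : ∀ h, tok.getLast? = some h → PySem.Chars.isspace h = false) :
    emitC (tok ++ pend) = if tok ≠ [] then [String.ofList tok] else [] := by
  have hnsp : ';' ∉ pend := by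
    intro hm
    have := hpw ';' hm
    simp [PySem.Chars.isspace] at this
  have hsp : spSemi (tok ++ pend) = [tok ++ pend] := by
    apply spSemi_no_semi
    intro hm
    rcases List.mem_append.mp hm with h1 | h2
    · exact hns h1
    · exact hnsp h2
  unfold emitC
  rw [hsp]
  simp only [List.map_cons, List.map_nil]
  rw [strip_of_clean tok pend hh hl hpw]
  cases tok with
  | nil => simp
  | cons a t =>
    have : String.ofList (a :: t) ≠ "" := by
      intro he
      have := congrArg String.toList he
      simp at this
    simp [this]

theorem emitC_append_semi (x y : List Char) :
    emitC (x ++ ';' :: y) = emitC x ++ emitC y := by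
  unfold emitC
  rw [spSemi_append]
  simp [List.filter_append]

theorem scan_invariant (cs : List Char) : ∀ (tok pend : List Char) (out : List String),
    (tok = [] → pend = []) →
    (∀ x ∈ pend, PySem.Chars.isspace x = true) →
    (';' ∉ tok) →
    (∀ h, tok.head? = some h → PySem.Chars.isspace h = false) →
    (∀ h, tok.getLast? = some h → PySem.Chars.isspace h = false) →
    (let st := cs.foldl spScanStep (tok, pend, out)
     if st.1 ≠ [] then st.2.2 ++ [String.ofList st.1] else st.2.2) =
      out ++ emitC (tok ++ pend ++ cs) := by
  induction cs with
  | nil =>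
    intro tok pend out hpe hpw hns hh hl
    simp only [List.foldl_nil, List.append_nil]
    rw [emitC_flush tok pend hpe hpw hns hh hl]
    cases tok with
    | nil => simp
    | cons a t => simp
  | cons c rest ih =>
    intro tok pend out hpe hpw hns hh hl
    by_cases hc : c = ';'
    · subst hc
      have hstep : spScanStep (tok, pend, out) ';' =
          ([], [], if tok ≠ [] then out ++ [String.ofList tok] else out) := by
        simp [spScanStep]
      simp only [List.foldl_cons, hstep]
      rw [ih [] [] _ (by simp) (by simp) (by simp) (by simp) (by simp)]
      have hr : tok ++ pend ++ ';' :: rest = (tok ++ pend) ++ ';' :: rest := by simp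
      rw [hr, emitC_append_semi]
      rw [emitC_flush tok pend hpe hpw hns hh hl]
      cases tok with
      | nil => simp
      | cons a t => simp
    · by_cases hw : PySem.Chars.isspace c = true
      · cases tok with
        | nil =>
          have hpnil : pend = [] := hpe rfl
          subst hpnil
          have hstep : spScanStep ([], [], out) c = ([], [], out) := by
            simp [spScanStep, hc, hw]
          simp only [List.foldl_cons, hstep]
          rw [ih [] [] out (by simp) (by simp) (by simp) (by simp) (by simp)]
          simp only [List.nil_append]
          rw [emitC_cons_space c rest hc hw]
        | cons a t =>
          have hstep : spScanStep (a :: t, pend, out) c = (a :: t, pend ++ [c], out) := by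
            simp [spScanStep, hc, hw]
          simp only [List.foldl_cons, hstep]
          rw [ih (a :: t) (pend ++ [c]) out (by simp) ?_ hns hh hl]
          · simp
          · intro x hx
            rcases List.mem_append.mp hx with h1 | h2
            · exact hpw x h1
            · simp at h2; subst h2; exact hw
      · have hw' : PySem.Chars.isspace c = false := by
          cases h : PySem.Chars.isspace c
          · rfl
          · exact absurd h hw
        have hstep : spScanStep (tok, pend, out) c = (tok ++ pend ++ [c], [], out) := by
          simp [spScanStep, hc, hw']
        simp only [List.foldl_cons, hstep]
        rw [ih (tok ++ pend ++ [c]) [] out (by simp) (by simp) ?_ ?_ ?_]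
        · simp
        · intro hm
          rcases List.mem_append.mp hm with h1 | h2
          · rcases List.mem_append.mp h1 with h3 | h4
            · exact hns h3
            · have := hpw ';' h4
              simp [PySem.Chars.isspace] at this
          · simp at h2; exact hc h2.symm
        · intro h hhd
          cases tok with
          | nil =>
            have : pend = [] := hpe rfl
            subst this
            simp at hhd
            subst hhd; exact hw'
          | cons a t =>
            simp at hhd
            subst hhd; exact hh a rfl
        · intro h hlast
          rw [List.getLast?_append] at hlast
          simp at hlast
          subst hlast; exact hw'

theorem scan_string (cs : List Char) (out : List String) :
    (let st := cs.foldl spScanStep ([], [], out)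
     if st.1 ≠ [] then st.2.2 ++ [String.ofList st.1] else st.2.2) = out ++ emitC cs := by
  have := scan_invariant cs [] [] out (by simp) (by simp) (by simp) (by simp) (by simp)
  simpa using this

-- A's per-string result equals emitC of the string's characters
theorem perString_eq_emitC (s : String) :
    ((cSplit s).map PySem.Str.strip).filter (fun t => t ≠ "") = emitC s.toList := by
  unfold emitC
  have hc : cSplit s = (spSemi s.toList).map String.ofList := by
    apply List.map_injective_iff.mpr (fun a b => String.toList_inj.mp)
    rw [cSplit_toList]
    simp [List.map_map, Function.comp_def]
  rw [hc, List.map_map]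
  congr 1
  apply List.map_congr_left
  intro seg _
  simp only [Function.comp_apply]
  apply String.toList_inj.mp
  simp [PySem.Str.toList_strip]

-- ===== VERDICT (by name: the statement is the Claim_ definition above) =====
theorem split_patterns_py_spec : Claim_equal_split_patterns_py := by
  intro extra _
  unfold Spec_split_patterns_py split_patterns_py_alt
  rw [splitA_eq_flatMap]
  have hfun : (fun (out : List String) (s : String) =>
      let st := s.toList.foldl spScanStep ([], [], out)
      if st.1 ≠ [] then st.2.2 ++ [String.ofList st.1] else st.2.2) =
      (fun out s => out ++ emitC s.toList) := by
    funext o s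
    exact scan_string s.toList o
  rw [hfun, PySem.List.foldl_append_eq_flatMap]
  simp only [List.nil_append]
  congr 1
  funext s
  exact perString_eq_emitC s
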